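-- pv_equiv track=rewrite | github.com/ymtz13/CompetitiveProgramming | AtCoder/ABC237/C.py | solve
-- ===== SOURCE A (Python) =====
-- def solve(S):
--   if S.count('a') == len(S):
--     return 'Yes'
--
--   x = None
--   for i, c in enumerate(S):
--     if c != 'a':
--       if x is None: x = i
--       y = i
--
--   z = len(S) - 1 - y
--
--   if x > z: return 'No'
--
--   T = 'a' * (z - x) + S
--
--   return 'Yes' if T[::-1] == T else 'No'
-- ===== SOURCE B (Python) =====
-- def solve(S):
--   T = list(S)
--   while True:
--     if T == T[::-1]:
--       return 'Yes'
--     if T and T[-1] == 'a':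
--       T.pop()
--     else:
--       return 'No'
-- ===== Notes on version B (the rewrite author's own statement) =====
-- stated objective: alternative
-- what changed: Instead of locating the first/last non-'a' characters by index arithmetic and palindrome-testing a front-padded copy of S, B repeatedly pops trailing 'a's from a list copy, testing palindromicity at each stage; it never counts the 'a' borders at all (correct because prepending m 'a's yields a palindrome iff S minus m trailing 'a's is a palindrome).
import Mathlib
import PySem

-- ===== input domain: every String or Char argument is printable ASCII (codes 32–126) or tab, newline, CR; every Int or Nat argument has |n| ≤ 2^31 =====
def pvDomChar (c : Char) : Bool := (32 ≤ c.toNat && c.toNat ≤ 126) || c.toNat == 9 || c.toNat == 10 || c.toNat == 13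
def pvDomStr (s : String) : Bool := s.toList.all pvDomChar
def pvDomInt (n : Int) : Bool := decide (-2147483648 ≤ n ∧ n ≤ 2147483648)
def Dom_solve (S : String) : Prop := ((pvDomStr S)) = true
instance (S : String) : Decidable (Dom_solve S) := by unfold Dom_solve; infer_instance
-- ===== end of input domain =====

-- B replaces A's index arithmetic + front-padded-copy palindrome test by a loop that pops
-- trailing 'a's one at a time, palindrome-testing the remaining list at each stage
-- (a different algorithm of similar cost; not claimed faster).

-- ===== PORT A =====
-- the for-loop over enumerate(S) as a foldl over the same state (x, y); both start
-- as Python's "unset" (none); x.getD 0 / y.getD 0 below are only read after the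
-- all-'a' case returned early, where the loop has set both
def solveStep (st : Option Int × Option Int) (ic : Int × Char) : Option Int × Option Int :=
  if ic.2 ≠ 'a' then ((if st.1 = none then some ic.1 else st.1), some ic.1) else st

def solve (S : String) : String :=
  if PySem.Str.count S "a" = PySem.Str.len S then "Yes"
  else
    let st := (PySem.List.enumerate S.toList 0).foldl solveStep (none, none)
    let y : Int := st.2.getD 0
    let z : Int := (PySem.Str.len S : Int) - 1 - y
    let x : Int := st.1.getD 0
    if x > z then "No"
    else
      -- T = 'a' * (z - x) + S ('a'*n is empty for n ≤ 0, hence .toNat);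
      -- T[::-1] == T compared via reverse
      let T : List Char := List.replicate (z - x).toNat 'a' ++ S.toList
      if T.reverse = T then "Yes" else "No"

-- ===== PORT B =====
-- Source B's while-loop as recursion on the list T: 'if T == T[::-1]' is the reverse
-- comparison; 'if T and T[-1] == "a"' matches on T.getLast? (none = falsy/empty);
-- T.pop() is dropLast
def solveGo (T : List Char) : Bool :=
  if T.reverse = T then true
  else
    match hT : T.getLast? with
    | some c => if c = 'a' then solveGo T.dropLast else false
    | none => false
termination_by T.length
decreasing_by
  have hne : T ≠ [] := by intro h; subst h; simp at hT
  have := List.length_pos_of_ne_nil hne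
  simp [List.length_dropLast]; omega

def solve_alt (S : String) : String :=
  if solveGo S.toList then "Yes" else "No"

-- ===== PRECONDITION & SPEC =====
def Spec_solve (S : String) (out : String) : Prop := out = solve_alt S
instance (S : String) (out : String) : Decidable (Spec_solve S out) := by unfold Spec_solve; infer_instance

-- ===== CLAIM (what is proved, stated in full; the proofs are below) =====
def Claim_equal_solve : Prop := ∀ (S : String), Dom_solve S → Spec_solve S (solve S)

-- ===== LEMMAS AND PROOFS =====

-- Python's S.count('a') with a one-character needle is the character count
theorem countGo_single (c : Char) (l : List Char) : ∀ (fuel acc : Nat), l.length ≤ fuel →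
    PySem.Chars.count.go [c] fuel l acc = acc + l.count c := by
  induction l with
  | nil => intro fuel acc _; cases fuel <;> simp [PySem.Chars.count.go]
  | cons h t ih =>
    intro fuel acc hf
    cases fuel with
    | zero => simp at hf
    | succ n =>
      simp only [PySem.Chars.count.go, List.isPrefixOf, List.isPrefixOf_cons₂]
      by_cases hc : h = c
      · simp [hc, List.count_cons, ih n (acc + 1) (by simpa using hf)]
        omega
      · simp [List.isPrefixOf, Ne.symm hc, hc, ih n acc (by simpa using hf), List.count_cons]

theorem count_single (c : Char) (l : List Char) :
    PySem.Chars.count l [c] = l.count c := by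
  simpa using countGo_single c l l.length 0 le_rfl

-- the x-component of A's loop, on its own
def fX : List Char → Int → Option Int → Option Int
  | [], _, xo => xo
  | c :: cs, s, xo => fX cs (s + 1) (if c ≠ 'a' then (if xo = none then some s else xo) else xo)

-- the y-component of A's loop, on its own
def gY : List Char → Int → Option Int → Option Int
  | [], _, yo => yo
  | c :: cs, s, yo => gY cs (s + 1) (if c ≠ 'a' then some s else yo)

theorem loop_eq (l : List Char) : ∀ (s : Int) (xo yo : Option Int),
    (PySem.List.enumerate l s).foldl solveStep (xo, yo) = (fX l s xo, gY l s yo) := by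
  induction l with
  | nil => intro s xo yo; simp [PySem.List.enumerate_nil, fX, gY]
  | cons c cs ih =>
    intro s xo yo
    rw [PySem.List.enumerate_cons, List.foldl_cons]
    by_cases hc : c = 'a' <;> simp [solveStep, hc, fX, gY, ih]

theorem fX_append (xs ys : List Char) : ∀ (s : Int) (xo : Option Int),
    fX (xs ++ ys) s xo = fX ys (s + xs.length) (fX xs s xo) := by
  induction xs with
  | nil => intro s xo; simp [fX]
  | cons c cs ih =>
    intro s xo
    simp only [List.cons_append, fX, ih, List.length_cons]
    congr 1
    push_cast
    ring

theorem gY_append (xs ys : List Char) : ∀ (s : Int) (yo : Option Int),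
    gY (xs ++ ys) s yo = gY ys (s + xs.length) (gY xs s yo) := by
  induction xs with
  | nil => intro s yo; simp [gY]
  | cons c cs ih =>
    intro s yo
    simp only [List.cons_append, gY, ih, List.length_cons]
    congr 1
    push_cast
    ring

theorem fX_replicate (n : Nat) (s : Int) (xo : Option Int) :
    fX (List.replicate n 'a') s xo = xo := by
  induction n generalizing s with
  | zero => simp [fX]
  | succ m ih => simp [List.replicate_succ, fX, ih]

theorem gY_replicate (n : Nat) (s : Int) (yo : Option Int) :
    gY (List.replicate n 'a') s yo = yo := by
  induction n generalizing s with
  | zero => simp [gY]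
  | succ m ih => simp [List.replicate_succ, gY, ih]

theorem fX_some (l : List Char) : ∀ (s : Int) (v : Int), fX l s (some v) = some v := by
  induction l with
  | nil => intro s v; simp [fX]
  | cons c cs ih => intro s v; by_cases hc : c = 'a' <;> simp [fX, hc, ih]

-- dropWhile never leaves an 'a' in front
theorem head?_dropWhileA (l : List Char) : (l.dropWhile (· == 'a')).head? ≠ some 'a' := by
  induction l with
  | nil => simp
  | cons c cs ih => by_cases hc : c = 'a' <;> simp [List.dropWhile_cons, hc, ih]

-- a list is its all-'a' takeWhile prefix followed by its dropWhile rest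
theorem takeWhileA_eq_replicate (l : List Char) :
    l.takeWhile (· == 'a') = List.replicate (l.takeWhile (· == 'a')).length 'a' := by
  apply List.eq_replicate_of_mem
  intro b hb
  have := List.mem_takeWhile_imp hb
  simpa using this

-- decomposition of a not-all-'a' list into 'a'-borders and a core
theorem decomp (l : List Char) (h : ¬ ∀ c ∈ l, c = 'a') :
    ∃ (lead : Nat) (core : List Char) (trail : Nat),
      l = List.replicate lead 'a' ++ core ++ List.replicate trail 'a' ∧
      core ≠ [] ∧ core.head? ≠ some 'a' ∧ core.getLast? ≠ some 'a' := by
  set core0 := l.dropWhile (· == 'a') with hcore0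
  have hl0 : l = List.replicate (l.takeWhile (· == 'a')).length 'a' ++ core0 := by
    conv_lhs => rw [← List.takeWhile_append_dropWhile (p := (· == 'a')) (l := l)]
    rw [← takeWhileA_eq_replicate]
  have hc0ne : core0 ≠ [] := by
    intro hnil
    apply h
    intro c hc
    have := List.dropWhile_eq_nil_iff.mp hnil c hc
    simpa using this
  have hc0hd : core0.head? ≠ some 'a' := head?_dropWhileA l
  set m := core0.reverse.dropWhile (· == 'a') with hm
  have hr0 : core0.reverse = List.replicate (core0.reverse.takeWhile (· == 'a')).length 'a' ++ m := by
    conv_lhs => rw [← List.takeWhile_append_dropWhile (p := (· == 'a')) (l := core0.reverse)]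
    rw [← takeWhileA_eq_replicate]
  have hmne : m ≠ [] := by
    intro hnil
    have hall : ∀ c ∈ core0.reverse, c = 'a' := by
      intro c hc
      have := List.dropWhile_eq_nil_iff.mp hnil c hc
      simpa using this
    obtain ⟨c, cs, hcc⟩ := List.exists_cons_of_ne_nil hc0ne
    apply hc0hd
    rw [hcc]
    simp only [List.head?_cons, Option.some.injEq]
    exact hall c (by simp [hcc])
  have hmhd : m.head? ≠ some 'a' := head?_dropWhileA core0.reverse
  refine ⟨(l.takeWhile (· == 'a')).length, m.reverse, (core0.reverse.takeWhile (· == 'a')).length,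
    ?_, by simpa using hmne, ?_, ?_⟩
  · have hc0 : core0 = m.reverse ++ List.replicate (core0.reverse.takeWhile (· == 'a')).length 'a' := by
      have := congrArg List.reverse hr0
      simpa [List.reverse_append] using this
    conv_lhs => rw [hl0, hc0]
    simp [List.append_assoc]
  · have : m.reverse.head? = core0.head? := by
      have hc0 : core0 = m.reverse ++ List.replicate (core0.reverse.takeWhile (· == 'a')).length 'a' := by
        have := congrArg List.reverse hr0
        simpa [List.reverse_append] using this
      rw [hc0, List.head?_append]
      obtain ⟨c, cs, hcc⟩ := List.exists_cons_of_ne_nil (by simpa using hmne : m.reverse ≠ [])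
      simp [hcc]
    rw [this]; exact hc0hd
  · rw [List.getLast?_reverse]; exact hmhd

-- S.count('a') == len(S) tests "all characters are 'a'"
theorem count_iff_all (S : String) :
    (PySem.Str.count S "a" = PySem.Str.len S) ↔ (∀ c ∈ S.toList, c = 'a') := by
  rw [PySem.Str.count_eq, PySem.Str.len_eq]
  have h1 : ("a".toList) = ['a'] := rfl
  rw [h1, count_single, Nat.cast_inj, List.count_eq_length]
  constructor <;> intro hh b hb <;> exact (hh b hb).symm

-- two 'a'-runs followed by non-'a'-headed tails: equal lists force equal runs
theorem prefix_a_unique : ∀ (p q : Nat) (u v : List Char),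
    List.replicate p 'a' ++ u = List.replicate q 'a' ++ v →
    u.head? ≠ some 'a' → v.head? ≠ some 'a' → p = q ∧ u = v := by
  intro p
  induction p with
  | zero =>
    intro q u v h hu hv
    cases q with
    | zero => exact ⟨rfl, by simpa using h⟩
    | succ m =>
      exfalso; apply hu
      rw [List.replicate_succ] at h
      simp only [List.replicate_zero, List.nil_append, List.cons_append] at h
      rw [h]; rfl
  | succ n ih =>
    intro q u v h hu hv
    cases q with
    | zero =>
      exfalso; apply hv
      rw [List.replicate_succ] at h
      simp only [List.replicate_zero, List.nil_append, List.cons_append] at h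
      rw [← h]; rfl
    | succ m =>
      rw [List.replicate_succ, List.replicate_succ] at h
      simp only [List.cons_append, List.cons.injEq] at h
      obtain ⟨hn, hu'⟩ := ih m u v h.2 hu hv
      exact ⟨by omega, hu'⟩

-- when the decomposed list equals its reverse: the runs match and the core is a palindrome
theorem pal_iff (lead trail : Nat) (core : List Char) (hne : core ≠ [])
    (hh : core.head? ≠ some 'a') (hl : core.getLast? ≠ some 'a') :
    ((List.replicate lead 'a' ++ core ++ List.replicate trail 'a').reverse
      = List.replicate lead 'a' ++ core ++ List.replicate trail 'a')
    ↔ (trail = lead ∧ core.reverse = core) := by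
  have hrev : (List.replicate lead 'a' ++ core ++ List.replicate trail 'a').reverse
      = List.replicate trail 'a' ++ (core.reverse ++ List.replicate lead 'a') := by
    simp [List.reverse_append, List.append_assoc]
  rw [hrev]
  constructor
  · intro h
    rw [List.append_assoc (List.replicate lead 'a')] at h
    have hu : (core.reverse ++ List.replicate lead 'a').head? ≠ some 'a' := by
      rw [List.head?_append_of_ne_nil _ (by simpa using hne), List.head?_reverse]
      exact hl
    have hv : (core ++ List.replicate trail 'a').head? ≠ some 'a' := by
      rw [List.head?_append_of_ne_nil _ hne]
      exact hh
    obtain ⟨hpq, huv⟩ := prefix_a_unique trail lead _ _ h hu hv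
    subst hpq
    exact ⟨rfl, List.append_cancel_right huv⟩
  · rintro ⟨ht, hpal⟩
    subst ht
    rw [hpal]
    simp [List.append_assoc]

-- B's loop on an all-'a' list: already a palindrome
theorem solveGo_replicate (n : Nat) : solveGo (List.replicate n 'a') = true := by
  unfold solveGo
  rw [if_pos (by simp)]

-- B's loop on the decomposed list: lead ≤ trail and the core is a palindrome
theorem solveGo_decomp : ∀ (trail lead : Nat) (core : List Char), core ≠ [] →
    core.head? ≠ some 'a' → core.getLast? ≠ some 'a' →
    solveGo (List.replicate lead 'a' ++ core ++ List.replicate trail 'a')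
      = (decide (lead ≤ trail) && decide (core.reverse = core)) := by
  intro trail
  induction trail with
  | zero =>
    intro lead core hne hh hl
    unfold solveGo
    by_cases hcase : (0 : Nat) = lead ∧ core.reverse = core
    · rw [if_pos ((pal_iff lead 0 core hne hh hl).mpr hcase)]
      simp [← hcase.1, hcase.2]
    · rw [if_neg (fun h => hcase ((pal_iff lead 0 core hne hh hl).mp h))]
      have hlast : (List.replicate lead 'a' ++ core ++ List.replicate 0 'a').getLast?
          = core.getLast? := by
        simp only [List.replicate_zero, List.append_nil]
        exact List.getLast?_append_of_ne_nil _ hne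
      obtain ⟨d, hd⟩ : ∃ d, core.getLast? = some d := by
        cases hcl : core.getLast? with
        | none => exact absurd (List.getLast?_eq_none_iff.mp hcl) hne
        | some d => exact ⟨d, rfl⟩
      rw [hlast, hd]
      have hdne : d ≠ 'a' := fun hda => hl (hda ▸ hd)
      simp only [hdne, if_false]
      by_cases hpal : core.reverse = core
      · have : ¬ lead = 0 := fun h0 => hcase ⟨h0.symm, hpal⟩
        simp [hpal, this]
      · simp [hpal]
  | succ t ih =>
    intro lead core hne hh hl
    unfold solveGo
    by_cases hcase : (t + 1 : Nat) = lead ∧ core.reverse = core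
    · rw [if_pos ((pal_iff lead (t+1) core hne hh hl).mpr hcase)]
      simp [← hcase.1, hcase.2]
    · rw [if_neg (fun h => hcase ((pal_iff lead (t+1) core hne hh hl).mp h))]
      have hlast : (List.replicate lead 'a' ++ core ++ List.replicate (t+1) 'a').getLast?
          = some 'a' := by
        rw [List.getLast?_append_of_ne_nil _ (by simp : List.replicate (t+1) 'a' ≠ [])]
        rw [List.replicate_succ']
        simp
      rw [hlast]
      simp only [if_pos rfl]
      have hdrop : (List.replicate lead 'a' ++ core ++ List.replicate (t+1) 'a').dropLast
          = List.replicate lead 'a' ++ core ++ List.replicate t 'a' := by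
        rw [List.dropLast_append_of_ne_nil (by simp : List.replicate (t+1) 'a' ≠ [])]
        simp [List.dropLast_replicate]
      rw [hdrop, ih lead core hne hh hl]
      by_cases hpal : core.reverse = core
      · have hne1 : lead ≠ t + 1 := fun h => hcase ⟨h.symm, hpal⟩
        by_cases hle : lead ≤ t
        · simp [hpal, hle, Nat.le_succ_of_le hle]
        · have : ¬ lead ≤ t + 1 := by omega
          simp [hpal, hle, this]
      · simp [hpal]

-- evaluation of both programs on the decomposed list
theorem main_eq (S : String) : solve S = solve_alt S := by
  by_cases hall : ∀ c ∈ S.toList, c = 'a'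
  · have hcount : PySem.Str.count S "a" = PySem.Str.len S := (count_iff_all S).mpr hall
    have hrep : S.toList = List.replicate S.toList.length 'a' :=
      List.eq_replicate_of_mem hall
    rw [solve, solve_alt, if_pos hcount, hrep, solveGo_replicate]
    simp
  · have hcount : ¬ (PySem.Str.count S "a" = PySem.Str.len S) := fun hc => hall ((count_iff_all S).mp hc)
    obtain ⟨lead, core, trail, hl, hne, hhd, hlast⟩ := decomp S.toList hall
    obtain ⟨c, cs, hcc⟩ := List.exists_cons_of_ne_nil hne
    have hcne : c ≠ 'a' := by
      intro hca; apply hhd; rw [hcc, hca]; rfl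
    obtain ⟨d, hdd⟩ : ∃ d, core = core.dropLast ++ [d] := by
      exact ⟨core.getLast hne, (List.dropLast_append_getLast hne).symm⟩
    have hdne : d ≠ 'a' := by
      intro hda
      apply hlast
      rw [hdd, hda]
      simp
    -- length bookkeeping
    have hlen : S.toList.length = lead + core.length + trail := by
      rw [hl]; simp; omega
    have hclen : core.length = core.dropLast.length + 1 := by
      conv_lhs => rw [hdd]
      simp
    -- A's loop
    have hfx : fX S.toList 0 none = some (lead : Int) := by
      rw [hl, List.append_assoc, fX_append, fX_replicate, hcc, List.cons_append]
      have h1 : ∀ s : Int, fX (c :: (cs ++ List.replicate trail 'a')) s none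
          = fX (cs ++ List.replicate trail 'a') (s + 1) (some s) := by
        intro s; rw [fX]; simp [hcne]
      rw [h1, fX_some]
      simp
    have hsing : ∀ (s : Int) (yo : Option Int), gY [d] s yo = some s := by
      intro s yo; rw [gY, gY]; simp [hdne]
    have hgy : gY S.toList 0 none = some ((lead : Int) + core.dropLast.length) := by
      rw [hl, gY_append, gY_replicate, gY_append, gY_replicate]
      conv_lhs => rw [hdd]
      rw [gY_append, hsing]
      simp
    have hloop : (PySem.List.enumerate S.toList 0).foldl solveStep (none, none)
        = (some (lead : Int), some ((lead : Int) + core.dropLast.length)) := by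
      rw [loop_eq, hfx, hgy]
    -- now evaluate both sides
    rw [solve, solve_alt]
    rw [if_neg hcount]
    simp only [hloop, Option.getD_some, PySem.Str.len_eq]
    have hzx : ((S.toList.length : Int) - 1 - ((lead : Int) + core.dropLast.length) : Int)
        = (trail : Int) := by
      push_cast [hclen] at hlen
      omega
    rw [hzx]
    -- B's side
    conv_rhs => rw [hl, solveGo_decomp trail lead core hne hhd hlast]
    by_cases hgt : (trail : Int) < (lead : Int)
    · rw [if_pos hgt]
      have : ¬ lead ≤ trail := by omega
      simp [this]
    · rw [if_neg hgt]
      have hle : lead ≤ trail := by omega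
      have hT : List.replicate ((trail : Int) - (lead : Int)).toNat 'a' ++ S.toList
          = List.replicate (trail - lead) 'a' ++ (List.replicate lead 'a' ++ core ++ List.replicate trail 'a') := by
        have htn : ((trail : Int) - (lead : Int)).toNat = trail - lead := by omega
        rw [htn, hl]
      have hT2 : List.replicate (trail - lead) 'a' ++ (List.replicate lead 'a' ++ core ++ List.replicate trail 'a')
          = List.replicate trail 'a' ++ core ++ List.replicate trail 'a' := by
        rw [← List.append_assoc, ← List.append_assoc, ← List.replicate_add]
        have h2 : trail - lead + lead = trail := by omega
        rw [h2]
      rw [hT, hT2]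
      by_cases hpal : core.reverse = core
      · rw [if_pos ((pal_iff trail trail core hne hhd hlast).mpr ⟨rfl, hpal⟩)]
        simp [hle, hpal]
      · rw [if_neg (fun h => hpal ((pal_iff trail trail core hne hhd hlast).mp h).2)]
        simp [hpal]

-- ===== VERDICT (by name: the statement is the Claim_ definition above) =====
theorem solve_spec : Claim_equal_solve := by
  intro S _
  unfold Spec_solve
  exact main_eq S
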